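-- pv_equiv track=rewrite | github.com/le-ar/agentiux-plugins | plugins/agentiux-dev/scripts/agentiux_dev_lib.py | _infer_branch_prefix
-- ===== SOURCE A (Python) =====
-- FALLBACK_BRANCH_PREFIX = "task"
--
-- def _infer_branch_prefix(branches: list[str]) -> tuple[str, str]:
--     prefixes: dict[str, int] = {}
--     for branch in branches:
--         if "/" not in branch:
--             continue
--         prefix = branch.split("/", 1)[0]
--         prefixes[prefix] = prefixes.get(prefix, 0) + 1
--     if prefixes:
--         prefix = sorted(prefixes.items(), key=lambda item: (-item[1], item[0]))[0][0]
--         return prefix, "history"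
--     return FALLBACK_BRANCH_PREFIX, "fallback"
-- ===== SOURCE B (Python) =====
-- FALLBACK_BRANCH_PREFIX = "task"
--
--
-- def _infer_branch_prefix(branches: list[str]) -> tuple[str, str]:
--     prefixes = sorted(b.split("/", 1)[0] for b in branches if "/" in b)
--     best_prefix = None
--     best_count = 0
--     i = 0
--     n = len(prefixes)
--     while i < n:
--         j = i
--         while j < n and prefixes[j] == prefixes[i]:
--             j += 1
--         if j - i > best_count:
--             best_prefix = prefixes[i]
--             best_count = j - i
--         i = j
--     if best_prefix is None:
--         return FALLBACK_BRANCH_PREFIX, "fallback"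
--     return best_prefix, "history"
-- ===== Notes on version B (the rewrite author's own statement) =====
-- stated objective: alternative
-- what changed: Replaces A's dict-of-counts plus a full sort of (count, name) items with sorting the prefix list once and scanning its equal runs, keeping a run only when its count is strictly larger, so ties resolve to the alphabetically first prefix.
import Mathlib
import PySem

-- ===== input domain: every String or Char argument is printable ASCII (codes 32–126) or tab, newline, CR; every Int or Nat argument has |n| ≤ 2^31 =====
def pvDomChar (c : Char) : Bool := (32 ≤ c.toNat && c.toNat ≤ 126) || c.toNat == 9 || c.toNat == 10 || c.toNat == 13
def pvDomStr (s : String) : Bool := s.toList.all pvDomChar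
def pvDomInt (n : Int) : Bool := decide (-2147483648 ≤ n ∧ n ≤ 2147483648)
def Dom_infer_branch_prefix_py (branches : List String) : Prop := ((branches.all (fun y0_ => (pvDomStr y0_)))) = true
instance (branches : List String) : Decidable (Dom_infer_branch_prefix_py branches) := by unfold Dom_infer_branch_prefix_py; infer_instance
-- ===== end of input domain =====

-- B replaces A's dict-counting plus full sort of (count, name) items by sorting the
-- prefix list once and scanning its equal runs, keeping a run only on a strictly
-- larger count (objective: alternative algorithm; same observable behaviour).

-- shared helper: branch.split("/", 1)[0]
def pySeg (b : String) : String := ((PySem.Str.splitMax? b "/" 1).getD []).headD ""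

-- ===== PORT A =====
def infer_branch_prefix_py (branches : List String) : String × String :=
  let prefixes : PySem.Dict String Int :=
    branches.foldl (fun d b =>
      if PySem.Str.isIn "/" b then d.insert (pySeg b) (d.getD (pySeg b) 0 + 1) else d)
      PySem.Dict.empty
  if prefixes.items ≠ [] then
    -- sorted(...)[0][0]: the list is nonempty in this branch, so the headD default is unreachable
    (((PySem.List.sorted2 prefixes.items (fun it => -it.2) (fun it => it.1)).headD ("", 0)).1,
      "history")
  else ("task", "fallback")

-- ===== PORT B =====
-- the two nested while loops of Source B: the inner while is the takeWhile/dropWhile split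
def bestLoop : List String → Option String → Int → Option String
  | [], best, _ => best
  | x :: rest, best, bestCount =>
    let run := rest.takeWhile (fun y => y == x)
    let rest' := rest.dropWhile (fun y => y == x)
    if bestCount < 1 + (run.length : Int) then bestLoop rest' (some x) (1 + (run.length : Int))
    else bestLoop rest' best bestCount
termination_by xs _ _ => xs.length
decreasing_by all_goals (simp only [List.length_cons]; exact Nat.lt_succ_of_le (List.length_dropWhile_le _ _))

def infer_branch_prefix_py_alt (branches : List String) : String × String :=
  let prefixes :=
    PySem.List.sorted ((branches.filter (fun b => PySem.Str.isIn "/" b)).map pySeg)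
      (fun x => x) false
  match bestLoop prefixes none 0 with
  | none => ("task", "fallback")
  | some p => (p, "history")

-- ===== PRECONDITION & SPEC =====
def Spec_infer_branch_prefix_py (branches : List String) (out : String × String) : Prop := out = infer_branch_prefix_py_alt branches
instance (branches : List String) (out : String × String) : Decidable (Spec_infer_branch_prefix_py branches out) := by unfold Spec_infer_branch_prefix_py; infer_instance

-- ===== CLAIM (what is proved, stated in full; the proofs are below) =====
def Claim_equal_infer_branch_prefix_py : Prop := ∀ (branches : List String), Dom_infer_branch_prefix_py branches → Spec_infer_branch_prefix_py branches (infer_branch_prefix_py branches)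

-- ===== LEMMAS AND PROOFS =====

-- the list of prefixes both programs count
def segList (branches : List String) : List String :=
  (branches.filter (fun b => PySem.Str.isIn "/" b)).map pySeg

-- the prefix both programs must return when some branch has a '/':
-- maximal count, ties broken by the alphabetically smallest name
def IsBest (L : List String) (p : String) : Prop :=
  p ∈ L ∧ ∀ q ∈ L, L.count q < L.count p ∨ (L.count q = L.count p ∧ p ≤ q)

theorem isBest_unique {L : List String} {p q : String}
    (hp : IsBest L p) (hq : IsBest L q) : p = q := by
  rcases hp with ⟨hpm, hpmin⟩
  rcases hq with ⟨hqm, hqmin⟩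
  rcases hpmin q hqm with h1 | ⟨hc1, hle1⟩
  · rcases hqmin p hpm with h2 | ⟨hc2, _⟩
    · omega
    · omega
  · rcases hqmin p hpm with h2 | ⟨_, hle2⟩
    · omega
    · exact le_antisymm hle1 hle2

-- A's comparison: the strict lexicographic order by (-count, name) that sorted2 uses
def beforeAI (a b : String × Int) : Bool :=
  decide ((-a.2 : Int) < -b.2) || (!decide ((-b.2 : Int) < -a.2) && decide (a.1 < b.1))

theorem beforeAI_iff (a b : String × Int) :
    beforeAI a b = true ↔ (b.2 < a.2 ∨ (a.2 = b.2 ∧ a.1 < b.1)) := by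
  simp only [beforeAI, Bool.or_eq_true, Bool.and_eq_true, Bool.not_eq_eq_eq_not,
    Bool.not_true, decide_eq_true_eq, decide_eq_false_iff_not]
  constructor
  · rintro (h | ⟨h1, h2⟩)
    · left; omega
    · by_cases hc : b.2 < a.2
      · left; exact hc
      · right; exact ⟨by omega, h2⟩
  · rintro (h | ⟨h1, h2⟩)
    · left; omega
    · right; exact ⟨by omega, h2⟩

theorem beforeAI_irrefl (a : String × Int) : beforeAI a a = false := by
  rw [Bool.eq_false_iff]
  intro h
  rcases (beforeAI_iff a a).1 h with h' | ⟨_, h'⟩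
  · omega
  · exact lt_irrefl _ h'

theorem beforeAI_trans_neg {y m x : String × Int}
    (h1 : beforeAI y m = false) (h2 : beforeAI x m = true) : beforeAI y x = false := by
  rw [Bool.eq_false_iff] at h1 ⊢
  intro h3
  apply h1
  rw [beforeAI_iff] at h2 h3 ⊢
  rcases h2 with h2 | ⟨h2a, h2b⟩
  · rcases h3 with h3 | ⟨h3a, h3b⟩
    · left; omega
    · left; omega
  · rcases h3 with h3 | ⟨h3a, h3b⟩
    · left; omega
    · right; exact ⟨by omega, lt_trans h3b h2b⟩

-- sorted2 with reverse = false is the insertBy fold with comparison beforeAI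
theorem sorted2_eq_foldl (xs : List (String × Int)) :
    PySem.List.sorted2 xs (fun it => -it.2) (fun it => it.1) false
      = xs.foldl (fun acc x => PySem.List.insertBy beforeAI x acc) [] := rfl

-- the head of the insertBy fold is minimal for beforeAI among all inserted elements
theorem head_min_foldl :
    ∀ (xs acc : List (String × Int)),
      (∀ m, acc.head? = some m → ∀ y ∈ acc, beforeAI y m = false) →
      ∀ m, (xs.foldl (fun acc x => PySem.List.insertBy beforeAI x acc) acc).head? = some m →
        (m ∈ acc ∨ m ∈ xs) ∧ ∀ y, (y ∈ acc ∨ y ∈ xs) → beforeAI y m = false := by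
  intro xs
  induction xs with
  | nil =>
    intro acc hinv m hm
    refine ⟨Or.inl ?_, ?_⟩
    · cases acc with
      | nil => simp at hm
      | cons a t => simp at hm; simp [hm]
    · intro y hy
      rcases hy with hy | hy
      · exact hinv m hm y hy
      · simp at hy
  | cons x xs ih =>
    intro acc hinv m hm
    simp only [List.foldl_cons] at hm
    have hinv' : ∀ m', (PySem.List.insertBy beforeAI x acc).head? = some m' →
        ∀ y ∈ PySem.List.insertBy beforeAI x acc, beforeAI y m' = false := by
      cases acc with
      | nil =>
        intro m' hm' y hy
        have h1 : PySem.List.insertBy beforeAI x [] = [x] := rfl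
        rw [h1] at hm' hy
        simp at hm' hy
        subst hm'; subst hy
        exact beforeAI_irrefl _
      | cons a t =>
        intro m' hm' y hy
        rw [PySem.List.mem_insertBy] at hy
        by_cases hxa : beforeAI x a = true
        · have : PySem.List.insertBy beforeAI x (a :: t) = x :: a :: t := by
            simp [PySem.List.insertBy, hxa]
          rw [this] at hm'
          simp at hm'
          subst hm'
          rcases hy with hy | hy
          · subst hy; exact beforeAI_irrefl _
          · exact beforeAI_trans_neg (hinv a rfl y hy) hxa
        · have : PySem.List.insertBy beforeAI x (a :: t)
              = a :: PySem.List.insertBy beforeAI x t := by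
            simp [PySem.List.insertBy, hxa]
          rw [this] at hm'
          simp at hm'
          subst hm'
          rcases hy with hy | hy
          · subst hy; exact Bool.eq_false_iff.2 (fun h => hxa h)
          · exact hinv _ rfl y hy
    obtain ⟨hmem, hmin⟩ := ih (PySem.List.insertBy beforeAI x acc) hinv' m hm
    constructor
    · rcases hmem with hmem | hmem
      · rw [PySem.List.mem_insertBy] at hmem
        rcases hmem with hmem | hmem
        · right; simp [hmem]
        · left; exact hmem
      · right; simp [hmem]
    · intro y hy
      rcases hy with hy | hy
      · exact hmin y (Or.inl ((PySem.List.mem_insertBy beforeAI x y acc).2 (Or.inr hy)))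
      · simp at hy
        rcases hy with hy | hy
        · exact hmin y (Or.inl ((PySem.List.mem_insertBy beforeAI x y acc).2 (Or.inl hy)))
        · exact hmin y (Or.inr hy)

-- A's dict is Counter(segList branches)
theorem A_dict_eq (branches : List String) :
    branches.foldl (fun d b =>
        if PySem.Str.isIn "/" b then d.insert (pySeg b) (d.getD (pySeg b) 0 + 1) else d)
      PySem.Dict.empty
      = PySem.Dict.counter (segList branches) := by
  rw [PySem.List.foldl_if_eq_foldl_filter (p := fun b => PySem.Str.isIn "/" b)
    (f := fun (d : PySem.Dict String Int) b => d.insert (pySeg b) (d.getD (pySeg b) 0 + 1))]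
  rw [segList, ← PySem.Dict.foldl_insert_getD_add_one_eq_counter, List.foldl_map]

theorem A_best (branches : List String) (h : segList branches ≠ []) :
    ∃ p, IsBest (segList branches) p ∧ infer_branch_prefix_py branches = (p, "history") := by
  set L := segList branches with hLdef
  have hitems : (PySem.Dict.counter L).items
      = (PySem.Set.ofList L).map (fun k => (k, (L.count k : Int))) :=
    PySem.Dict.items_counter L
  have hSne : PySem.Set.ofList L ≠ [] := by
    intro hS
    obtain ⟨a, t, hL⟩ := List.exists_cons_of_ne_nil h
    have : a ∈ PySem.Set.ofList L := (PySem.Set.mem_ofList L a).2 (by rw [hL]; simp)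
    rw [hS] at this
    simp at this
  have hitemsne : (PySem.Dict.counter L).items ≠ [] := by
    rw [hitems]
    simpa using hSne
  -- the sorted items list is nonempty
  have hsne : PySem.List.sorted2 (PySem.Dict.counter L).items
      (fun it => -it.2) (fun it => it.1) false ≠ [] := by
    intro hnil
    have := (PySem.List.sorted2_perm (PySem.Dict.counter L).items
      (fun it => -it.2) (fun it => it.1) false).length_eq
    rw [hnil] at this
    exact hitemsne (List.eq_nil_of_length_eq_zero this.symm)
  obtain ⟨m, t, hmt⟩ := List.exists_cons_of_ne_nil hsne
  have hhead : (PySem.List.sorted2 (PySem.Dict.counter L).items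
      (fun it => -it.2) (fun it => it.1) false).head? = some m := by rw [hmt]; rfl
  rw [sorted2_eq_foldl] at hhead
  obtain ⟨hmem, hmin⟩ := head_min_foldl (PySem.Dict.counter L).items [] (by simp) m hhead
  have hmem' : m ∈ (PySem.Dict.counter L).items := by
    rcases hmem with hmem | hmem
    · simp at hmem
    · exact hmem
  rw [hitems] at hmem'
  obtain ⟨p, hpS, hpm⟩ := List.mem_map.1 hmem'
  refine ⟨p, ⟨(PySem.Set.mem_ofList L p).1 hpS, ?_⟩, ?_⟩
  · intro q hq
    have hqS : q ∈ PySem.Set.ofList L := (PySem.Set.mem_ofList L q).2 hq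
    have hy : (q, (L.count q : Int)) ∈ (PySem.Dict.counter L).items := by
      rw [hitems]; exact List.mem_map.2 ⟨q, hqS, rfl⟩
    have hbf := hmin (q, (L.count q : Int)) (Or.inr hy)
    rw [Bool.eq_false_iff] at hbf
    rw [← hpm] at hbf
    rw [ne_eq, beforeAI_iff] at hbf
    push_neg at hbf
    simp only at hbf
    obtain ⟨hb1, hb2⟩ := hbf
    by_cases hc : L.count q = L.count p
    · right
      refine ⟨hc, le_of_not_gt (hb2 (by exact_mod_cast hc))⟩
    · left
      omega
  · show infer_branch_prefix_py branches = (p, "history")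
    unfold infer_branch_prefix_py
    simp only [A_dict_eq branches, ← hLdef]
    rw [if_pos hitemsne, hmt]
    simp [← hpm]

-- count of the head's run in a ≤-sorted list x :: rest
theorem run_facts {x : String} {rest : List String}
    (hpw : (x :: rest).Pairwise (· ≤ ·)) :
    (∀ y ∈ rest.takeWhile (fun y => y == x), y = x) ∧
    (∀ y ∈ rest.dropWhile (fun y => y == x), x < y) := by
  constructor
  · intro y hy
    have := List.mem_takeWhile_imp hy
    simpa using this
  · intro y hy
    cases hd : rest.dropWhile (fun y => y == x) with
    | nil => rw [hd] at hy; simp at hy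
    | cons a t =>
      have hsub := List.dropWhile_sublist (p := fun y => y == x) (l := rest)
      have hax : a ≠ x := by
        have h0 := List.head?_dropWhile_not (fun y => y == x) rest
        rw [hd] at h0
        simp at h0
        exact h0
      have hxa : x ≤ a := (List.pairwise_cons.1 hpw).1 a (hsub.subset (by rw [hd]; simp))
      have hxalt : x < a := lt_of_le_of_ne hxa (fun h => hax h.symm)
      have hpw' : (a :: t).Pairwise (· ≤ ·) := by
        have h1 : (rest.dropWhile (fun y => y == x)).Pairwise (· ≤ ·) :=
          ((List.pairwise_cons.1 hpw).2).sublist (List.dropWhile_sublist _)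
        rw [hd] at h1
        exact h1
      rw [hd] at hy
      rcases List.mem_cons.1 hy with hy | hy
      · exact hy ▸ hxalt
      · exact lt_of_lt_of_le hxalt ((List.pairwise_cons.1 hpw').1 y hy)

-- the strict-improvement run scan returns the alphabetically first prefix of maximal count
theorem bestLoop_spec :
    ∀ (n : Nat) (xs : List String), xs.length ≤ n → xs.Pairwise (· ≤ ·) →
    ∀ (bo : Option String) (c : Int),
      ((∀ p ∈ xs, (xs.count p : Int) ≤ c) → bestLoop xs bo c = bo) ∧
      (∀ p₀ ∈ xs, c < (xs.count p₀ : Int) →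
        ∃ p ∈ xs, bestLoop xs bo c = some p ∧ c < (xs.count p : Int) ∧
          ∀ q ∈ xs, xs.count q < xs.count p ∨ (xs.count q = xs.count p ∧ p ≤ q)) := by
  intro n
  induction n with
  | zero =>
    intro xs hlen _ bo c
    have : xs = [] := List.eq_nil_of_length_eq_zero (Nat.le_zero.1 hlen)
    subst this
    exact ⟨fun _ => by rw [bestLoop], fun p₀ hp₀ _ => absurd hp₀ (by simp)⟩
  | succ n ih =>
    intro xs hlen hpw bo c
    cases xs with
    | nil => exact ⟨fun _ => by rw [bestLoop], fun p₀ hp₀ _ => absurd hp₀ (by simp)⟩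
    | cons x rest =>
      obtain ⟨hrun, hdrop⟩ := run_facts hpw
      set r := rest.takeWhile (fun y => y == x) with hr
      set rest' := rest.dropWhile (fun y => y == x) with hrest'
      have hsplit : rest = r ++ rest' := (List.takeWhile_append_dropWhile).symm
      have hk : (x :: rest).count x = 1 + r.length := by
        have h1 : r.count x = r.length := List.count_eq_length.2 (fun b hb => (hrun b hb).symm)
        have h2 : rest'.count x = 0 := List.count_eq_zero.2 (fun hx => lt_irrefl x (hdrop x hx))
        rw [hsplit]
        simp only [List.count_cons, List.count_append, h1, h2, BEq.refl, if_true]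
        omega
      have hcq : ∀ q ∈ rest', (x :: rest).count q = rest'.count q := by
        intro q hq
        have hqx : q ≠ x := fun h => lt_irrefl x (h ▸ hdrop q hq)
        have h1 : r.count q = 0 := List.count_eq_zero.2 (fun hqr => hqx (hrun q hqr))
        rw [hsplit]
        simp only [List.count_cons, List.count_append, h1]
        have h2 : (x == q) = false := beq_eq_false_iff_ne.2 (Ne.symm hqx)
        rw [h2]
        simp
      have hmemsplit : ∀ q, q ∈ x :: rest → q = x ∨ q ∈ rest' := by
        intro q hq
        rcases List.mem_cons.1 hq with h | h
        · exact Or.inl h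
        · rw [hsplit] at h
          rcases List.mem_append.1 h with h | h
          · exact Or.inl (hrun q h)
          · exact Or.inr h
      have hpw' : rest'.Pairwise (· ≤ ·) :=
        (List.pairwise_cons.1 hpw).2.sublist (List.dropWhile_sublist _)
      have hlen' : rest'.length ≤ n := by
        have hdl := List.length_dropWhile_le (fun y => y == x) rest
        rw [← hrest'] at hdl
        simp at hlen
        omega
      have hunfold : ∀ (b : Option String) (c' : Int), bestLoop (x :: rest) b c'
          = if c' < 1 + (r.length : Int) then bestLoop rest' (some x) (1 + (r.length : Int))
            else bestLoop rest' b c' := by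
        intro b c'
        rw [bestLoop]
      by_cases hck : c < 1 + (r.length : Int)
      · -- strict improvement: the accumulator becomes (some x, count x)
        rw [hunfold bo c, if_pos hck]
        constructor
        · intro hall
          exfalso
          have := hall x (by simp)
          rw [hk] at this
          push_cast at this
          omega
        · intro p₀ hp₀ hcp₀
          by_cases hex : ∃ q ∈ rest', (1 + (r.length : Int)) < rest'.count q
          · obtain ⟨q₀, hq₀, hq₀c⟩ := hex
            obtain ⟨p, hpmem, hploop, hpc, hpmin⟩ :=
              (ih rest' hlen' hpw' (some x) (1 + (r.length : Int))).2 q₀ hq₀ hq₀c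
            refine ⟨p, by rw [hsplit]; simp [hpmem], hploop, ?_, ?_⟩
            · rw [hcq p hpmem]; omega
            · intro q hq
              rcases hmemsplit q hq with h | h
              · subst h
                left
                rw [hk, hcq p hpmem]
                have : ((1:Int) + r.length) < rest'.count p := hpc
                push_cast at this ⊢
                omega
              · rw [hcq q h, hcq p hpmem]
                exact hpmin q h
          · push_neg at hex
            have := (ih rest' hlen' hpw' (some x) (1 + (r.length : Int))).1 hex
            refine ⟨x, by simp, this, by rw [hk]; push_cast; omega, ?_⟩
            intro q hq
            rcases hmemsplit q hq with h | h
            · subst h; right; exact ⟨rfl, le_refl _⟩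
            · rw [hcq q h, hk]
              have := hex q h
              by_cases he : rest'.count q = 1 + r.length
              · right
                exact ⟨by omega, le_of_lt (hdrop q h)⟩
              · left
                push_cast at this
                omega
      · -- no improvement: the run is not kept
        constructor
        · intro hall
          rw [hunfold bo c, if_neg hck]
          exact (ih rest' hlen' hpw' bo c).1
            (fun p hp => by rw [← hcq p hp]; exact hall p (by rw [hsplit]; simp [hp]))
        · intro p₀ hp₀ hcp₀
          rcases hmemsplit p₀ hp₀ with h | h
          · exfalso; rw [h, hk] at hcp₀; push_cast at hcp₀; omega
          · rw [hcq p₀ h] at hcp₀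
            obtain ⟨p, hpmem, hploop, hpc, hpmin⟩ := (ih rest' hlen' hpw' bo c).2 p₀ h hcp₀
            refine ⟨p, by rw [hsplit]; simp [hpmem], by rw [hunfold bo c, if_neg hck]; exact hploop, by rw [hcq p hpmem]; exact hpc, ?_⟩
            intro q hq
            rcases hmemsplit q hq with hh | hh
            · subst hh
              left
              rw [hk, hcq p hpmem]
              have h1 : ¬ (c < 1 + (r.length : Int)) := hck
              push_cast at h1 ⊢
              omega
            · rw [hcq q hh, hcq p hpmem]
              exact hpmin q hh

theorem B_best (branches : List String) (h : segList branches ≠ []) :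
    ∃ p, IsBest (segList branches) p ∧ infer_branch_prefix_py_alt branches = (p, "history") := by
  set L := segList branches with hLdef
  set P := PySem.List.sorted L (fun x => x) false with hP
  have hperm : P.Perm L := PySem.List.sorted_perm L (fun x => x) false
  have hPne : P ≠ [] := by
    intro hnil
    exact h ((PySem.List.sorted_eq_nil_iff L (fun x => x) false).1 hnil)
  obtain ⟨x, t, hxt⟩ := List.exists_cons_of_ne_nil hPne
  have hxP : x ∈ P := by rw [hxt]; simp
  have hx0 : (0 : Int) < P.count x := by
    have : 0 < P.count x := List.count_pos_iff.2 hxP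
    exact_mod_cast this
  obtain ⟨p, hpmem, hploop, _, hpmin⟩ :=
    (bestLoop_spec P.length P le_rfl (PySem.List.sorted_pairwise L (fun x => x)) none 0).2 x hxP hx0
  refine ⟨p, ⟨hperm.subset hpmem, ?_⟩, ?_⟩
  · intro q hq
    have := hpmin q (hperm.symm.subset hq)
    rwa [hperm.count_eq q, hperm.count_eq p] at this
  · have e1 : infer_branch_prefix_py_alt branches
        = (match bestLoop P none 0 with
           | none => ("task", "fallback")
           | some q => (q, "history")) := rfl
    rw [e1, hploop]

theorem both_fallback (branches : List String) (h : segList branches = []) :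
    infer_branch_prefix_py branches = ("task", "fallback") ∧
    infer_branch_prefix_py_alt branches = ("task", "fallback") := by
  constructor
  · unfold infer_branch_prefix_py
    simp only [A_dict_eq branches, h]
    rfl
  · have e1 : infer_branch_prefix_py_alt branches
        = (match bestLoop (PySem.List.sorted (segList branches) (fun x => x) false) none 0 with
           | none => ("task", "fallback")
           | some q => (q, "history")) := rfl
    rw [e1, h]
    rw [show PySem.List.sorted ([] : List String) (fun x => x) false = [] from rfl]
    rw [show bestLoop [] none 0 = none from by rw [bestLoop]]

-- ===== VERDICT (by name: the statement is the Claim_ definition above) =====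
theorem infer_branch_prefix_py_spec : Claim_equal_infer_branch_prefix_py := by
  intro branches _
  unfold Spec_infer_branch_prefix_py
  by_cases h : segList branches = []
  · obtain ⟨hA, hB⟩ := both_fallback branches h
    rw [hA, hB]
  · obtain ⟨p, hbp, hA⟩ := A_best branches h
    obtain ⟨p', hbp', hB⟩ := B_best branches h
    rw [hA, hB, isBest_unique hbp hbp']
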